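-- pv_equiv track=rewrite | github.com/lenis2000/homepage | _scripts/arxiv/render_abstracts.py | has_raw_math
-- ===== SOURCE A (Python) =====
-- def has_raw_math(text):
--     """Check if text has unrendered $...$ math ($ not inside HTML tags)."""
--     in_tag = False
--     for ch in text:
--         if ch == '<':
--             in_tag = True
--         elif ch == '>':
--             in_tag = False
--         elif ch == '$' and not in_tag:
--             return True
--     return False
-- ===== SOURCE B (Python) =====
-- import re
--
-- def has_raw_math(text):
--     """Check if text has unrendered $...$ math ($ not inside HTML tags)."""
--     cleaned = re.sub(r'<[^>]*>?', '', text)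
--     return '$' in cleaned
-- ===== Notes on version B (the rewrite author's own statement) =====
-- stated objective: idiomatic
-- what changed: Replaced the fused character-by-character state machine with a two-phase strip-then-search: a single regex substitution <[^>]*>? deletes every HTML tag span (an unclosed trailing tag swallows the rest, matching A's sticky in_tag flag), then a plain substring membership test looks for the dollar sign in the cleaned text; the regex engine and the built-in substring search run in C instead of a per-character Python loop.
import Mathlib
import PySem

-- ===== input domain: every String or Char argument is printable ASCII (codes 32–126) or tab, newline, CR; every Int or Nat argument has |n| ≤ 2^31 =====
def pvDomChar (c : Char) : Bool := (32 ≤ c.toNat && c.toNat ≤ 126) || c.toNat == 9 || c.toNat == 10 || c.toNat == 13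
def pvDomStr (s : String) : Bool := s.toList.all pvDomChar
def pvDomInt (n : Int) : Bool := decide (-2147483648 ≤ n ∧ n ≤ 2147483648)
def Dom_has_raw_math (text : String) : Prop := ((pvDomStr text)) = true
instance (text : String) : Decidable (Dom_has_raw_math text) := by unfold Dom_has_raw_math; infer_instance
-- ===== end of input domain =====

-- B strips all HTML tag spans first (regex <[^>]*>? in Source B, transcribed by hand here) and then
-- searches the cleaned text for '$'; same result as A's fused state-machine scan, objective: idiomatic.

-- ===== PORT A =====
-- A's single scan with an in_tag flag and early return on '$'.
def pvLoopA (in_tag : Bool) : List Char → Bool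
  | [] => false
  | c :: rest =>
    if c = '<' then pvLoopA true rest
    else if c = '>' then pvLoopA false rest
    else if c = '$' ∧ ¬ in_tag then true
    else pvLoopA in_tag rest

def has_raw_math (text : String) : Bool := pvLoopA false text.toList

-- ===== PORT B =====
-- One regex match '<[^>]*>?': drop up to and including the next '>' (or everything, if none).
def pvSkipTag : List Char → List Char
  | [] => []
  | c :: rest => if c = '>' then rest else pvSkipTag rest

theorem pvSkipTag_length_le (l : List Char) : (pvSkipTag l).length ≤ l.length := by
  induction l with
  | nil => simp [pvSkipTag]
  | cons c rest ih =>
    simp only [pvSkipTag]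
    split
    · simp
    · exact Nat.le_succ_of_le ih

-- re.sub(r'<[^>]*>?', '', text): remove every tag span, keep the other characters.
def pvStripTags : List Char → List Char
  | [] => []
  | c :: rest =>
    if c = '<' then pvStripTags (pvSkipTag rest)
    else c :: pvStripTags rest
termination_by l => l.length
decreasing_by
  · exact Nat.lt_succ_of_le (pvSkipTag_length_le rest)
  · simp

def has_raw_math_alt (text : String) : Bool := (pvStripTags text.toList).contains '$'

-- ===== PRECONDITION & SPEC =====
def Spec_has_raw_math (text : String) (out : Bool) : Prop := out = has_raw_math_alt text
instance (text : String) (out : Bool) : Decidable (Spec_has_raw_math text out) := by unfold Spec_has_raw_math; infer_instance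

-- ===== CLAIM (what is proved, stated in full; the proofs are below) =====
def Claim_equal_has_raw_math : Prop := ∀ (text : String), Dom_has_raw_math text → Spec_has_raw_math text (has_raw_math text)

-- ===== LEMMAS AND PROOFS =====
theorem pv_key : ∀ n (l : List Char), l.length ≤ n →
    (pvLoopA false l = (pvStripTags l).contains '$') ∧
    (pvLoopA true l = (pvStripTags (pvSkipTag l)).contains '$') := by
  intro n
  induction n with
  | zero =>
    intro l hl
    have : l = [] := List.eq_nil_of_length_eq_zero (Nat.le_zero.mp hl)
    subst this
    simp [pvLoopA, pvStripTags, pvSkipTag]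
  | succ n ih =>
    intro l hl
    cases l with
    | nil => simp [pvLoopA, pvStripTags, pvSkipTag]
    | cons c rest =>
      have hr : rest.length ≤ n := Nat.le_of_succ_le_succ hl
      obtain ⟨ih1, ih2⟩ := ih rest hr
      constructor
      · by_cases h1 : c = '<'
        · subst h1
          simp [pvLoopA, pvStripTags, ih2]
        · by_cases h2 : c = '>'
          · subst h2
            simp [pvLoopA, pvStripTags, ih1]
          · by_cases h3 : c = '$'
            · subst h3
              simp [pvLoopA, pvStripTags]
            · simp [pvLoopA, pvStripTags, h1, h2, h3, ih1, Ne.symm h3]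
      · by_cases h1 : c = '<'
        · subst h1
          simp [pvLoopA, pvSkipTag, ih2]
        · by_cases h2 : c = '>'
          · subst h2
            simp [pvLoopA, pvSkipTag, ih1]
          · simp [pvLoopA, pvSkipTag, h1, h2, ih2]

-- ===== VERDICT (by name: the statement is the Claim_ definition above) =====
theorem has_raw_math_spec : Claim_equal_has_raw_math := by
  intro text _
  unfold Spec_has_raw_math has_raw_math has_raw_math_alt
  exact (pv_key text.toList.length text.toList le_rfl).1
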